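-- pv_equiv track=rewrite | github.com/sihaixianyu/vae-cf | process.py | filter_min_item_cnt
-- ===== SOURCE A (Python) =====
-- def filter_min_item_cnt(raw_dict: dict, min_item_cnt: int, uid_map: dict) -> (dict, dict):
--     sorted_uid_map = sorted(uid_map.items(), key=lambda x: x[-1], reverse=True)
--     for old_uid, new_uid in sorted_uid_map:
--         item_infos = raw_dict[new_uid]
--         item_num = len(item_infos)
--
--         # 计算剔除user的数量，方便后面进行重排序
--         modifier = 0
--         if item_num < min_item_cnt:
--             raw_dict.pop(new_uid)
--             uid_map.pop(old_uid)
--             modifier += 1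
--         elif modifier > 0:
--             item_infos[new_uid - modifier] = item_infos
--             uid_map[old_uid] = new_uid - modifier
--     return raw_dict, uid_map
-- ===== SOURCE B (Python) =====
-- def filter_min_item_cnt(raw_dict: dict, min_item_cnt: int, uid_map: dict) -> (dict, dict):
--     # Staged rebuild instead of in-place deletion: first collect the set of
--     # under-count new_uids, then build both result dicts by comprehension.
--     bad = {new_uid for new_uid in uid_map.values() if len(raw_dict[new_uid]) < min_item_cnt}
--     kept_raw = {uid: infos for uid, infos in raw_dict.items() if uid not in bad}
--     kept_map = {old_uid: new_uid for old_uid, new_uid in uid_map.items() if new_uid not in bad}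
--     return kept_raw, kept_map
-- ===== Notes on version B (the rewrite author's own statement) =====
-- stated objective: alternative
-- what changed: B replaces A's sorted in-place deletion loop (pop on both dicts while iterating, plus a dead modifier/elif branch) by a staged rebuild: one pass collecting the set of under-count new_uids, then two comprehensions constructing fresh result dicts by membership in that set; no sort and no mutation.
import Mathlib
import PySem

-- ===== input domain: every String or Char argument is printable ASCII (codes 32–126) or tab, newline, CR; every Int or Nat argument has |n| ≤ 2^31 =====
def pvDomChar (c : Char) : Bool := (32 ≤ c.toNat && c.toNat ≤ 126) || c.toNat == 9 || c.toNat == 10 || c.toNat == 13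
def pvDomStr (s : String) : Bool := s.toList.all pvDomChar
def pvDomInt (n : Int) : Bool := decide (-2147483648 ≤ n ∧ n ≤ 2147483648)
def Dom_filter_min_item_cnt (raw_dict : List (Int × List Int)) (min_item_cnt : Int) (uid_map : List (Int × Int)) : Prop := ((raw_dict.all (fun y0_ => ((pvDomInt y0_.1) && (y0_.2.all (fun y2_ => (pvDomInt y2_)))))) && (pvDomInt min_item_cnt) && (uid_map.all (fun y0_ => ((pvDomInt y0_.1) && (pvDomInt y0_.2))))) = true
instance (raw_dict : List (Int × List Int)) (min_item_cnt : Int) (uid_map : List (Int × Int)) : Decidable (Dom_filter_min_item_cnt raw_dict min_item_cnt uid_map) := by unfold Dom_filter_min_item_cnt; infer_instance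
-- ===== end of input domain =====

-- B replaces A's sorted in-place deletion loop by a staged rebuild: collect the set of under-count
-- new_uids, then construct both result dicts by comprehension (objective: alternative). A mutates
-- its two dict arguments in place while B builds fresh dicts; the equivalence proved here is about
-- the returned pair of dicts.

-- ===== PORT A =====
-- One iteration of A's loop body. 'modifier' is reset to 0 before the if, so the elif branch
-- ('modifier > 0') can never execute; it is transcribed literally (the in-place list assignment
-- 'item_infos[new_uid - modifier] = item_infos' inside it is unreachable dead code, and the
-- uid_map[old_uid] update is transcribed as Dict.insert).
def pvStepA (min_item_cnt : Int) (s : PySem.Dict Int (List Int) × PySem.Dict Int Int) (p : Int × Int) :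
    PySem.Dict Int (List Int) × PySem.Dict Int Int :=
  let item_infos := s.1.getD p.2 []
  let item_num : Int := item_infos.length
  let modifier : Int := 0
  if item_num < min_item_cnt then (s.1.erase p.2, s.2.erase p.1)
  else if modifier > 0 then (s.1, s.2.insert p.1 (p.2 - modifier))
  else s

def filter_min_item_cnt (raw_dict : List (Int × List Int)) (min_item_cnt : Int) (uid_map : List (Int × Int)) : (List (Int × List Int)) × (List (Int × Int)) :=
  let rd : PySem.Dict Int (List Int) := PySem.Dict.mk raw_dict
  let ud : PySem.Dict Int Int := PySem.Dict.mk uid_map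
  let sorted_uid_map := PySem.List.sorted ud.items (fun x => x.2) true
  let res := sorted_uid_map.foldl (pvStepA min_item_cnt) (rd, ud)
  (res.1.items, res.2.items)

-- ===== PORT B =====
-- Source B: bad = {n for n in uid_map.values() if len(raw_dict[n]) < min_item_cnt}, then the two
-- dict comprehensions are filters of the items lists by (non-)membership in bad.
def filter_min_item_cnt_alt (raw_dict : List (Int × List Int)) (min_item_cnt : Int) (uid_map : List (Int × Int)) : (List (Int × List Int)) × (List (Int × Int)) :=
  let rd : PySem.Dict Int (List Int) := PySem.Dict.mk raw_dict
  let ud : PySem.Dict Int Int := PySem.Dict.mk uid_map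
  let bad : PySem.Set Int :=
    PySem.Set.ofList (ud.values.filter (fun n => decide (((rd.getD n []).length : Int) < min_item_cnt)))
  let kept_raw : PySem.Dict Int (List Int) :=
    PySem.Dict.mk (rd.items.filter (fun p => !(PySem.Set.contains bad p.1)))
  let kept_map : PySem.Dict Int Int :=
    PySem.Dict.mk (ud.items.filter (fun p => !(PySem.Set.contains bad p.2)))
  (kept_raw.items, kept_map.items)

-- ===== PRECONDITION & SPEC =====
-- Pre_ excludes (a) inputs on which the Python A raises KeyError: a uid_map value missing from
-- raw_dict's keys, or a duplicated uid_map value whose item list is below min_item_cnt (its first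
-- processed occurrence pops the key, the second lookup then raises); and (b) association lists
-- with a duplicated key in either dict-typed argument, which represent no Python dict (dict keys
-- are unique, so no Python call ever sees them).
def Pre_filter_min_item_cnt (raw_dict : List (Int × List Int)) (min_item_cnt : Int) (uid_map : List (Int × Int)) : Prop :=
  (raw_dict.map Prod.fst).Nodup ∧ (uid_map.map Prod.fst).Nodup ∧
  ∀ p ∈ uid_map, p.2 ∈ raw_dict.map Prod.fst ∧
    (1 < (uid_map.map Prod.snd).count p.2 →
      min_item_cnt ≤ ((PySem.Dict.mk raw_dict).getD p.2 []).length)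
instance (raw_dict : List (Int × List Int)) (min_item_cnt : Int) (uid_map : List (Int × Int)) : Decidable (Pre_filter_min_item_cnt raw_dict min_item_cnt uid_map) := by unfold Pre_filter_min_item_cnt; infer_instance

def pvWitness_filter_min_item_cnt : (List (Int × List Int)) × Int × (List (Int × Int)) :=
  ([(10, [1, 2]), (11, [3]), (12, [4, 5, 6])], 2, [(0, 10), (1, 11), (2, 12)])

def Spec_filter_min_item_cnt (raw_dict : List (Int × List Int)) (min_item_cnt : Int) (uid_map : List (Int × Int)) (out : (List (Int × List Int)) × (List (Int × Int))) : Prop := out = filter_min_item_cnt_alt raw_dict min_item_cnt uid_map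
instance (raw_dict : List (Int × List Int)) (min_item_cnt : Int) (uid_map : List (Int × Int)) (out : (List (Int × List Int)) × (List (Int × Int))) : Decidable (Spec_filter_min_item_cnt raw_dict min_item_cnt uid_map out) := by unfold Spec_filter_min_item_cnt; infer_instance

-- ===== CLAIM (what is proved, stated in full; the proofs are below) =====
def Claim_equal_filter_min_item_cnt : Prop := ∀ (raw_dict : List (Int × List Int)) (min_item_cnt : Int) (uid_map : List (Int × Int)), Dom_filter_min_item_cnt raw_dict min_item_cnt uid_map → Pre_filter_min_item_cnt raw_dict min_item_cnt uid_map → Spec_filter_min_item_cnt raw_dict min_item_cnt uid_map (filter_min_item_cnt raw_dict min_item_cnt uid_map)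

-- ===== LEMMAS AND PROOFS =====

-- find? for key k' is unchanged by filtering out another key k.
theorem pv_find?_filter_ne {κ ν : Type} [BEq κ] [LawfulBEq κ] (l : List (κ × ν)) (k k' : κ)
    (h : k' ≠ k) :
    List.find? (fun p => p.1 == k') (l.filter (fun p => !p.1 == k)) =
      List.find? (fun p => p.1 == k') l := by
  induction l with
  | nil => rfl
  | cons p rest ih =>
      rw [List.filter_cons]
      by_cases hpk : p.1 = k
      · rw [if_neg (by simp [hpk])]
        rw [ih, List.find?_cons_of_neg (by simp [hpk]; exact fun hh => h hh.symm)]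
      · rw [if_pos (by simp [hpk])]
        by_cases hp : p.1 = k'
        · simp [hp]
        · simp [hp, ih]

-- Looking up a key other than the erased one is unchanged.
theorem pv_getD_erase_of_ne {κ ν : Type} [BEq κ] [LawfulBEq κ] (d : PySem.Dict κ ν) (k k' : κ)
    (h : k' ≠ k) (dflt : ν) : (d.erase k).getD k' dflt = d.getD k' dflt := by
  simp only [PySem.Dict.getD, PySem.Dict.get?, PySem.Dict.erase]
  rw [pv_find?_filter_ne _ _ _ h]

-- Looking up the erased key gives the default.
theorem pv_getD_erase_self {κ ν : Type} [BEq κ] [LawfulBEq κ] (d : PySem.Dict κ ν) (k : κ)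
    (dflt : ν) : (d.erase k).getD k dflt = dflt := by
  simp only [PySem.Dict.getD, PySem.Dict.get?, PySem.Dict.erase]
  rw [List.find?_filter]
  have hnone : List.find? (fun a : κ × ν => decide (((!a.1 == k) = true) ∧ ((a.1 == k) = true)))
      d.items = none :=
    List.find?_eq_none.mpr (by intro p _; by_cases hp : p.1 = k <;> simp [hp])
  rw [hnone]
  rfl

-- erase is a filter on the items list, so two erases commute.
theorem pv_erase_erase_comm {κ ν : Type} [BEq κ] (d : PySem.Dict κ ν) (k k' : κ) :
    (d.erase k).erase k' = (d.erase k').erase k := by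
  simp [PySem.Dict.erase, List.filter_filter, Bool.and_comm]

-- A's step, simplified (the elif guard 'modifier > 0' is decidably false), is an erase-if-short step.
theorem pv_stepA_eq (min_item_cnt : Int) (s : PySem.Dict Int (List Int) × PySem.Dict Int Int)
    (p : Int × Int) :
    pvStepA min_item_cnt s p =
      if ((s.1.getD p.2 []).length : Int) < min_item_cnt
      then (s.1.erase p.2, s.2.erase p.1) else s := by
  simp [pvStepA]

-- The step function is left-commutative: the two lookups see the same list lengths whether or not
-- the other pair was processed first (an erased key reads back as [], and [] is below any bound
-- that some list length is already below), and erases commute.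
theorem pv_step_comm (m : Int) (z : PySem.Dict Int (List Int) × PySem.Dict Int Int)
    (x y : Int × Int) :
    pvStepA m (pvStepA m z x) y = pvStepA m (pvStepA m z y) x := by
  rcases z with ⟨r, u⟩
  rcases x with ⟨o, n⟩
  rcases y with ⟨o', n'⟩
  simp only [pv_stepA_eq]
  by_cases hn : n' = n
  · subst hn
    by_cases c : ((r.getD n' []).length : Int) < m
    · have hm : (0 : Int) < m := lt_of_le_of_lt (by positivity) c
      have h0 : (((r.erase n').getD n' []).length : Int) < m := by
        rw [pv_getD_erase_self]; simpa using hm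
      simp only [c, if_pos, h0]
      simp [pv_erase_erase_comm]
    · simp [c]
  · by_cases c1 : ((r.getD n []).length : Int) < m <;>
    by_cases c2 : ((r.getD n' []).length : Int) < m <;>
    simp [c1, c2, pv_getD_erase_of_ne _ _ _ hn, pv_getD_erase_of_ne _ _ _ (Ne.symm hn),
      pv_erase_erase_comm]

-- foldl over a permutation with a left-commutative step.
theorem pv_foldl_perm (m : Int) {l l' : List (Int × Int)} (h : l.Perm l')
    (z : PySem.Dict Int (List Int) × PySem.Dict Int Int) :
    l.foldl (pvStepA m) z = l'.foldl (pvStepA m) z :=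
  h.foldl_eq' (fun x _ y _ z => pv_step_comm m z x y) z

-- A chain of erases is one filter of the items list.
theorem pv_foldl_erase_items {ν : Type} (ks : List Int) (d : PySem.Dict Int ν) :
    (ks.foldl PySem.Dict.erase d).items = d.items.filter (fun p => decide (p.1 ∉ ks)) := by
  induction ks generalizing d with
  | nil => simp
  | cons k ks ih =>
      rw [List.foldl_cons, ih]
      show (d.items.filter (fun p => !p.1 == k)).filter (fun p => decide (p.1 ∉ ks)) = _
      rw [List.filter_filter]
      exact List.filter_congr (by intro p _; by_cases h1 : p.1 = k <;> by_cases h2 : p.1 ∈ ks <;>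
        simp [h1, h2])

-- A's whole loop, over any processing order l of the uid pairs, is: erase the under-count new_uids
-- from the raw dict and their old_uids from the uid dict — provided the running raw dict still
-- agrees with the original on the values yet to be processed (no duplicated under-count value).
theorem pv_fold_eq_erases (m : Int) (rd : PySem.Dict Int (List Int)) :
    ∀ (l : List (Int × Int)) (r : PySem.Dict Int (List Int)) (u : PySem.Dict Int Int),
    (∀ p ∈ l, r.getD p.2 [] = rd.getD p.2 []) →
    (∀ v : Int, 1 < (l.map Prod.snd).count v → ¬ (((rd.getD v []).length : Int) < m)) →
    l.foldl (pvStepA m) (r, u) =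
      (((l.filter (fun p => decide (((rd.getD p.2 []).length : Int) < m))).map Prod.snd).foldl PySem.Dict.erase r,
       ((l.filter (fun p => decide (((rd.getD p.2 []).length : Int) < m))).map Prod.fst).foldl PySem.Dict.erase u) := by
  intro l
  induction l with
  | nil => intro r u _ _; rfl
  | cons p l ih =>
      intro r u Hagree Hdup
      have hp : r.getD p.2 [] = rd.getD p.2 [] := Hagree p (by simp)
      have Hdup' : ∀ v : Int, 1 < (l.map Prod.snd).count v → ¬ (((rd.getD v []).length : Int) < m) := by
        intro v hv
        exact Hdup v (lt_of_lt_of_le hv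
          ((List.sublist_cons_self p.2 (l.map Prod.snd)).count_le v))
      rw [List.foldl_cons, pv_stepA_eq]
      by_cases c : ((rd.getD p.2 []).length : Int) < m
      · have hne : ∀ q ∈ l, q.2 ≠ p.2 := by
          intro q hq he
          apply Hdup p.2 _ c
          have h1 : 0 < (l.map Prod.snd).count p.2 :=
            List.count_pos_iff.mpr (he ▸ List.mem_map_of_mem hq)
          simp only [List.map_cons, List.count_cons_self]
          omega
        rw [if_pos (by rw [hp]; exact c)]
        rw [ih (r.erase p.2) (u.erase p.1)
          (by intro q hq; rw [pv_getD_erase_of_ne _ _ _ (hne q hq)]; exact Hagree q (by simp [hq]))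
          Hdup']
        rw [List.filter_cons_of_pos (by simpa using c)]
        simp
      · rw [if_neg (by rw [hp]; exact c)]
        rw [ih r u (fun q hq => Hagree q (by simp [hq])) Hdup']
        rw [List.filter_cons_of_neg (by simpa using c)]

-- Set.contains (ofList vs) as a decide of list membership.
theorem pv_contains_ofList (vs : List Int) (x : Int) :
    PySem.Set.contains (PySem.Set.ofList vs) x = decide (x ∈ vs) := by
  by_cases h : x ∈ vs
  · rw [(PySem.Set.contains_iff _ _).mpr ((PySem.Set.mem_ofList _ _).mpr h)]
    simp [h]
  · have hc : PySem.Set.contains (PySem.Set.ofList vs) x ≠ true := fun hc =>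
      h ((PySem.Set.mem_ofList _ _).mp ((PySem.Set.contains_iff _ _).mp hc))
    rw [Bool.eq_false_iff.mpr hc, decide_eq_false h]

-- ===== VERDICT (by name: the statement is the Claim_ definition above) =====
theorem filter_min_item_cnt_spec : Claim_equal_filter_min_item_cnt := by
  intro raw_dict m uid_map _ hpre
  obtain ⟨hndr, hndu, hmem⟩ := hpre
  unfold Spec_filter_min_item_cnt filter_min_item_cnt filter_min_item_cnt_alt
  simp only []
  set rd : PySem.Dict Int (List Int) := PySem.Dict.mk raw_dict with hrd
  set ud : PySem.Dict Int Int := PySem.Dict.mk uid_map with hud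
  have hitems : ud.items = uid_map := rfl
  have hHdup : ∀ v : Int, 1 < (uid_map.map Prod.snd).count v → ¬ (((rd.getD v []).length : Int) < m) := by
    intro v hv hlt
    have hvmem : v ∈ uid_map.map Prod.snd := List.count_pos_iff.mp (by omega)
    obtain ⟨p, hp, hpe⟩ := List.mem_map.mp hvmem
    have := (hmem p hp).2 (by rw [hpe]; exact hv)
    rw [hpe] at this
    omega
  rw [pv_foldl_perm m (PySem.List.sorted_perm ud.items (fun x => x.2) true)]
  rw [hitems]
  rw [pv_fold_eq_erases m rd uid_map rd ud (fun _ _ => rfl) hHdup]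
  have hvs : ud.values.filter (fun n => decide (((rd.getD n []).length : Int) < m)) =
      (uid_map.filter (fun p => decide (((rd.getD p.2 []).length : Int) < m))).map Prod.snd := by
    show (uid_map.map Prod.snd).filter _ = _
    rw [List.filter_map]
    rfl
  refine Prod.ext ?_ ?_
  · -- raw_dict side
    dsimp only
    rw [pv_foldl_erase_items]
    refine List.filter_congr ?_
    intro q _
    rw [pv_contains_ofList, hvs]
    by_cases h : q.1 ∈ (uid_map.filter (fun p => decide (((rd.getD p.2 []).length : Int) < m))).map Prod.snd
    · simp [h]
    · simp [h]
  · -- uid_map side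
    dsimp only
    rw [pv_foldl_erase_items]
    refine List.filter_congr ?_
    intro q hq
    rw [pv_contains_ofList, hvs]
    have hq' : q ∈ uid_map := hq
    have hiff : (q.1 ∈ (uid_map.filter (fun p => decide (((rd.getD p.2 []).length : Int) < m))).map Prod.fst)
        ↔ (q.2 ∈ (uid_map.filter (fun p => decide (((rd.getD p.2 []).length : Int) < m))).map Prod.snd) := by
      constructor
      · intro h
        obtain ⟨p, hpf, hpe⟩ := List.mem_map.mp h
        have hpm := List.mem_of_mem_filter hpf
        have hpq : p = q := List.inj_on_of_nodup_map hndu hpm hq' hpe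
        exact List.mem_map_of_mem (hpq ▸ hpf)
      · intro h
        obtain ⟨p, hpf, hpe⟩ := List.mem_map.mp h
        -- q itself satisfies the filter predicate, since p.2 = q.2 and p passes it
        have hps := (List.mem_filter.mp hpf).2
        rw [hpe] at hps
        exact List.mem_map_of_mem (List.mem_filter.mpr ⟨hq', hps⟩)
    by_cases h : q.1 ∈ (uid_map.filter (fun p => decide (((rd.getD p.2 []).length : Int) < m))).map Prod.fst
    · simp [h, hiff.mp h]
    · have h2 : q.2 ∉ (uid_map.filter (fun p => decide (((rd.getD p.2 []).length : Int) < m))).map Prod.snd :=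
        fun hh => h (hiff.mpr hh)
      simp [h, h2]
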